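-- pv_equiv track=rewrite | github.com/AKHIL-149/RNA | src/tbm/similarity.py | get_alignment_mapping
-- ===== SOURCE A (Python) =====
-- def get_alignment_mapping(aligned_query, aligned_template):
--     """
--     Create a mapping from query positions to template positions based on alignment.
--
--     This is crucial for transferring coordinates from template to query.
--
--     Args:
--         aligned_query (str): Aligned query sequence (with gaps as '-')
--         aligned_template (str): Aligned template sequence (with gaps as '-')
--
--     Returns:
--         dict: Mapping from query position (0-indexed) to template position (0-indexed)
--               Only includes positions where both sequences have residues (no gaps)
--     """
--     mapping = {}
--     query_pos = 0
--     template_pos = 0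
--
--     for q_char, t_char in zip(aligned_query, aligned_template):
--         # If both have residues (not gaps), create mapping
--         if q_char != '-' and t_char != '-':
--             mapping[query_pos] = template_pos
--
--         # Increment positions
--         if q_char != '-':
--             query_pos += 1
--         if t_char != '-':
--             template_pos += 1
--
--     return mapping
-- ===== SOURCE B (Python) =====
-- def get_alignment_mapping(aligned_query, aligned_template):
--     # Two-phase decomposition: first precompute, per alignment column, the
--     # exclusive prefix count of non-gap characters (= the residue index of
--     # that column), then select the columns where both sides have residues.
--     qpos = []
--     acc = 0
--     for c in aligned_query:
--         qpos.append(acc)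
--         if c != '-':
--             acc += 1
--     tpos = []
--     acc = 0
--     for c in aligned_template:
--         tpos.append(acc)
--         if c != '-':
--             acc += 1
--     return {qp: tp
--             for (qc, qp), (tc, tp) in zip(zip(aligned_query, qpos),
--                                           zip(aligned_template, tpos))
--             if qc != '-' and tc != '-'}
-- ===== Notes on version B (the rewrite author's own statement) =====
-- stated objective: alternative
-- what changed: Replaces A's single counter-incrementing loop by a two-phase decomposition: precompute per-column exclusive prefix counts of non-gap characters for each sequence, then build the mapping with a filtered dict comprehension over the zipped columns.
import Mathlib
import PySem

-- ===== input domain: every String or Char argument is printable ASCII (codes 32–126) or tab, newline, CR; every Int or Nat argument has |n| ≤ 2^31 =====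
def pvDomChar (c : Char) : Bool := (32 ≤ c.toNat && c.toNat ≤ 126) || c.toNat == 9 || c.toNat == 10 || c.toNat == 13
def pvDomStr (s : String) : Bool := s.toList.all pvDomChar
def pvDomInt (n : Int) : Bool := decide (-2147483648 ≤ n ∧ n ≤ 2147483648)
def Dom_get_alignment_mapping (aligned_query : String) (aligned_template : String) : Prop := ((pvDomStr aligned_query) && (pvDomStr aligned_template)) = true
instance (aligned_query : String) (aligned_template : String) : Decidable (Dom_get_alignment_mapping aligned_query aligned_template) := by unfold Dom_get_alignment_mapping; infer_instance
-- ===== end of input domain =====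

-- B precomputes per-column exclusive prefix counts of non-gap characters, then builds the
-- mapping by a filtered comprehension over the zipped columns (objective: alternative decomposition).

-- ===== PORT A =====
-- one counter-incrementing loop over the zipped strings, state = (mapping, query_pos, template_pos)
def get_alignment_mapping (aligned_query : String) (aligned_template : String) : List (Int × Int) :=
  (((aligned_query.toList.zip aligned_template.toList).foldl
      (fun (st : PySem.Dict Int Int × Int × Int) p =>
        let m := if p.1 ≠ '-' ∧ p.2 ≠ '-' then st.1.insert st.2.1 st.2.2 else st.1
        let qp := if p.1 ≠ '-' then st.2.1 + 1 else st.2.1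
        let tp := if p.2 ≠ '-' then st.2.2 + 1 else st.2.2
        (m, qp, tp))
      (PySem.Dict.empty, 0, 0)).1).items

-- ===== PORT B =====
-- the loop "qpos.append(acc); if c != '-': acc += 1" over a string's characters
def pvPrefix (acc : Int) : List Char → List Int
  | [] => []
  | c :: cs => acc :: pvPrefix (if c ≠ '-' then acc + 1 else acc) cs

def get_alignment_mapping_alt (aligned_query : String) (aligned_template : String) : List (Int × Int) :=
  let qpos := pvPrefix 0 aligned_query.toList
  let tpos := pvPrefix 0 aligned_template.toList
  -- dict comprehension: inserts in column order
  (((aligned_query.toList.zip qpos).zip (aligned_template.toList.zip tpos)).foldl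
      (fun (m : PySem.Dict Int Int) p =>
        if p.1.1 ≠ '-' ∧ p.2.1 ≠ '-' then m.insert p.1.2 p.2.2 else m)
      PySem.Dict.empty).items

-- ===== PRECONDITION & SPEC =====
def Spec_get_alignment_mapping (aligned_query : String) (aligned_template : String) (out : List (Int × Int)) : Prop := out = get_alignment_mapping_alt aligned_query aligned_template
instance (aligned_query : String) (aligned_template : String) (out : List (Int × Int)) : Decidable (Spec_get_alignment_mapping aligned_query aligned_template out) := by unfold Spec_get_alignment_mapping; infer_instance

-- ===== CLAIM (what is proved, stated in full; the proofs are below) =====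
def Claim_equal_get_alignment_mapping : Prop := ∀ (aligned_query : String) (aligned_template : String), Dom_get_alignment_mapping aligned_query aligned_template → Spec_get_alignment_mapping aligned_query aligned_template (get_alignment_mapping aligned_query aligned_template)

-- ===== LEMMAS AND PROOFS =====
theorem pv_fold_eq (q : List Char) : ∀ (t : List Char) (m : PySem.Dict Int Int) (a b : Int),
    ((q.zip t).foldl
      (fun (st : PySem.Dict Int Int × Int × Int) p =>
        let m := if p.1 ≠ '-' ∧ p.2 ≠ '-' then st.1.insert st.2.1 st.2.2 else st.1
        let qp := if p.1 ≠ '-' then st.2.1 + 1 else st.2.1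
        let tp := if p.2 ≠ '-' then st.2.2 + 1 else st.2.2
        (m, qp, tp))
      (m, a, b)).1
    = ((q.zip (pvPrefix a q)).zip (t.zip (pvPrefix b t))).foldl
        (fun (m : PySem.Dict Int Int) p =>
          if p.1.1 ≠ '-' ∧ p.2.1 ≠ '-' then m.insert p.1.2 p.2.2 else m) m := by
  induction q with
  | nil => intro t m a b; simp [pvPrefix]
  | cons qc qs ih =>
    intro t m a b
    cases t with
    | nil => simp [pvPrefix]
    | cons tc ts =>
      simp only [List.zip_cons_cons, List.foldl_cons, pvPrefix]
      exact ih ts _ _ _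

theorem get_alignment_mapping_spec : Claim_equal_get_alignment_mapping := by
  intro aq at' _
  unfold Spec_get_alignment_mapping get_alignment_mapping get_alignment_mapping_alt
  rw [pv_fold_eq]
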